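-- pv_equiv track=rewrite | github.com/blacksoxx/vmware-migration-agent | providers/gcp/sizing_table.py | get_instance_type
-- ===== SOURCE A (Python) =====
-- from bisect import bisect_left
--
-- _GCP_SIZING_TABLE: dict[int, list[tuple[int, str]]] = {
--     1: [
--         (1024, "e2-micro"),
--         (2048, "e2-small"),
--     ],
--     2: [
--         (4096, "e2-medium"),
--         (8192, "e2-standard-2"),
--         (16384, "n2-standard-2"),
--     ],
--     4: [
--         (8192, "e2-standard-4"),
--         (16384, "n2-standard-4"),
--         (32768, "n2-highmem-4"),
--     ],
--     8: [
--         (16384, "e2-standard-8"),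
--         (32768, "n2-standard-8"),
--         (65536, "n2-highmem-8"),
--     ],
--     16: [
--         (32768, "n2-standard-16"),
--         (65536, "n2-standard-16"),
--         (131072, "n2-highmem-16"),
--     ],
-- }
--
-- def get_instance_type(vcpus: int, ram_mb: int) -> str:
--     """Return GCP machine type using exact-vCPU and closest-ceiling RAM lookup."""
--     if vcpus <= 0:
--         raise ValueError("vcpus must be > 0")
--     if ram_mb <= 0:
--         raise ValueError("ram_mb must be > 0")
--
--     selected_vcpus = _select_vcpu_bucket(vcpus)
--     options = _GCP_SIZING_TABLE[selected_vcpus]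
--
--     ram_values = [entry[0] for entry in options]
--     index = bisect_left(ram_values, ram_mb)
--
--     if index < len(options):
--         return options[index][1]
--
--     return options[-1][1]
--
-- def _select_vcpu_bucket(requested_vcpus: int) -> int:
--     if requested_vcpus in _GCP_SIZING_TABLE:
--         return requested_vcpus
--
--     available = sorted(_GCP_SIZING_TABLE)
--     for candidate in available:
--         if candidate >= requested_vcpus:
--             return candidate
--
--     return available[-1]
-- ===== SOURCE B (Python) =====
-- _GCP_SIZING_TABLE = {
--     1: [
--         (1024, "e2-micro"),
--         (2048, "e2-small"),
--     ],
--     2: [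
--         (4096, "e2-medium"),
--         (8192, "e2-standard-2"),
--         (16384, "n2-standard-2"),
--     ],
--     4: [
--         (8192, "e2-standard-4"),
--         (16384, "n2-standard-4"),
--         (32768, "n2-highmem-4"),
--     ],
--     8: [
--         (16384, "e2-standard-8"),
--         (32768, "n2-standard-8"),
--         (65536, "n2-highmem-8"),
--     ],
--     16: [
--         (32768, "n2-standard-16"),
--         (65536, "n2-standard-16"),
--         (131072, "n2-highmem-16"),
--     ],
-- }
--
-- def get_instance_type(vcpus: int, ram_mb: int) -> str:
--     """Flat scan: first bucket with enough vCPUs (last as fallback), then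
--     first entry with enough RAM (last as fallback)."""
--     if vcpus <= 0:
--         raise ValueError("vcpus must be > 0")
--     if ram_mb <= 0:
--         raise ValueError("ram_mb must be > 0")
--
--     for cpu, options in _GCP_SIZING_TABLE.items():
--         if cpu >= vcpus:
--             break
--
--     for ram, name in options:
--         if ram_mb <= ram:
--             break
--     return name
-- ===== Notes on version B (the rewrite author's own statement) =====
-- stated objective: idiomatic
-- what changed: Replaced the membership-test + sorted-keys scan bucket helper and the bisect_left binary search with a single pair of first-match/last-fallback linear scans over the table items.
import Mathlib
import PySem

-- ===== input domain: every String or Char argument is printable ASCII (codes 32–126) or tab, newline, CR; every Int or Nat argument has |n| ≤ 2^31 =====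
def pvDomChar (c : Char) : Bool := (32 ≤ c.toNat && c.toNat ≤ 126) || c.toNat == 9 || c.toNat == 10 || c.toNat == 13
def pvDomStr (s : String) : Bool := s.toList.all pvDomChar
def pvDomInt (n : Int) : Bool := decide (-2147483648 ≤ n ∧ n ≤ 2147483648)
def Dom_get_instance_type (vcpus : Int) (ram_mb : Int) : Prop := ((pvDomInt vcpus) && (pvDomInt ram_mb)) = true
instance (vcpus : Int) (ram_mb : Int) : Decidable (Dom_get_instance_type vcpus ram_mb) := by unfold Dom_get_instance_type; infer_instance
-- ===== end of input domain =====

-- B replaces the membership test + sorted scan + bisect_left with a single flat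
-- first-match/last-fallback scan over the table items (idiomatic; same cost on this fixed table).

-- the module-level sizing table (dict[int, list[tuple[int,str]]] → association list)
def pvItems : List (Int × List (Int × String)) :=
  [ (1, [(1024, "e2-micro"), (2048, "e2-small")]),
    (2, [(4096, "e2-medium"), (8192, "e2-standard-2"), (16384, "n2-standard-2")]),
    (4, [(8192, "e2-standard-4"), (16384, "n2-standard-4"), (32768, "n2-highmem-4")]),
    (8, [(16384, "e2-standard-8"), (32768, "n2-standard-8"), (65536, "n2-highmem-8")]),
    (16, [(32768, "n2-standard-16"), (65536, "n2-standard-16"), (131072, "n2-highmem-16")]) ]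

-- ===== PORT A =====
def pvTable : PySem.Dict Int (List (Int × String)) := PySem.Dict.mk pvItems

-- the 'for candidate in available: if candidate >= requested: return candidate' loop
def pvSelLoop (r : Int) : List Int → Option Int
  | [] => none
  | c :: rest => if c ≥ r then some c else pvSelLoop r rest

def pvSelectVcpuBucket (r : Int) : Int :=
  if pvTable.contains r then r
  else
    let available := PySem.List.sorted pvTable.keys (fun x => x) false
    match pvSelLoop r available with
    | some c => c
    | none => (PySem.List.pyGet? available (-1)).getD 0

-- lines 'ram_values = …; index = bisect_left(…); if index < len(options): … else …' of A
def pvRamLookup (options : List (Int × String)) (ram_mb : Int) : String :=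
  let ramValues := options.map (·.1)
  let index := PySem.List.bisectLeft ramValues ram_mb
  if index < options.length then
    ((PySem.List.pyGet? options (index : Int)).getD (0, "")).2
  else
    ((PySem.List.pyGet? options (-1)).getD (0, "")).2

-- vcpus ≤ 0 or ram_mb ≤ 0 raise ValueError in Python (excluded by Pre_); port returns "" there
def get_instance_type (vcpus : Int) (ram_mb : Int) : String :=
  if vcpus ≤ 0 then ""
  else if ram_mb ≤ 0 then ""
  else pvRamLookup ((pvTable.get? (pvSelectVcpuBucket vcpus)).getD []) ram_mb

-- ===== PORT B =====
-- 'for cpu, options in table.items(): if cpu >= vcpus: break' — first item with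
-- cpu ≥ vcpus, or the last item if none qualifies
def pvFindBucket (v : Int) : List (Int × List (Int × String)) → List (Int × String)
  | [] => []
  | [(_, o)] => o
  | (c, o) :: rest => if c ≥ v then o else pvFindBucket v rest

-- 'for ram, name in options: if ram_mb <= ram: break; return name'
def pvFindRam (m : Int) : List (Int × String) → String
  | [] => ""
  | [(_, n)] => n
  | (r, n) :: rest => if m ≤ r then n else pvFindRam m rest

def get_instance_type_alt (vcpus : Int) (ram_mb : Int) : String :=
  if vcpus ≤ 0 then ""
  else if ram_mb ≤ 0 then ""
  else pvFindRam ram_mb (pvFindBucket vcpus pvItems)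

-- ===== PRECONDITION & SPEC =====
-- Python A raises ValueError when vcpus ≤ 0 or ram_mb ≤ 0; exactly those inputs are excluded.
def Pre_get_instance_type (vcpus : Int) (ram_mb : Int) : Prop := 0 < vcpus ∧ 0 < ram_mb
instance (vcpus : Int) (ram_mb : Int) : Decidable (Pre_get_instance_type vcpus ram_mb) := by unfold Pre_get_instance_type; infer_instance
def pvWitness_get_instance_type : Int × Int := (3, 9000)

def Spec_get_instance_type (vcpus : Int) (ram_mb : Int) (out : String) : Prop := out = get_instance_type_alt vcpus ram_mb
instance (vcpus : Int) (ram_mb : Int) (out : String) : Decidable (Spec_get_instance_type vcpus ram_mb out) := by unfold Spec_get_instance_type; infer_instance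

-- ===== CLAIM (what is proved, stated in full; the proofs are below) =====
def Claim_equal_get_instance_type : Prop := ∀ (vcpus : Int) (ram_mb : Int), Dom_get_instance_type vcpus ram_mb → Pre_get_instance_type vcpus ram_mb → Spec_get_instance_type vcpus ram_mb (get_instance_type vcpus ram_mb)

-- ===== LEMMAS AND PROOFS =====

-- B's RAM scan on a 2- resp. 3-entry bucket, as an if-chain
lemma findRam2 (m a b : Int) (x y : String) :
    pvFindRam m [(a, x), (b, y)] = if m ≤ a then x else y := by
  simp [pvFindRam]

lemma findRam3 (m a b c : Int) (x y z : String) :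
    pvFindRam m [(a, x), (b, y), (c, z)] = if m ≤ a then x else if m ≤ b then y else z := by
  simp [pvFindRam]

-- A's bisect-based RAM lookup on a sorted 2- resp. 3-entry bucket, as the same if-chain
lemma ramA2 (m a b : Int) (x y : String) (hab : a < b) :
    pvRamLookup [(a, x), (b, y)] m = if m ≤ a then x else y := by
  simp [pvRamLookup, PySem.List.bisectLeft, PySem.List.bisectLeftLoop,
    PySem.List.pyGet?, PySem.List.pyIdx?]
  split_ifs <;> first | rfl | omega

lemma ramA3 (m a b c : Int) (x y z : String) (hab : a < b) (_hbc : b < c) :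
    pvRamLookup [(a, x), (b, y), (c, z)] m = if m ≤ a then x else if m ≤ b then y else z := by
  simp [pvRamLookup, PySem.List.bisectLeft, PySem.List.bisectLeftLoop,
    PySem.List.pyGet?, PySem.List.pyIdx?]
  split_ifs <;> first | rfl | omega

-- sorted keys of the table, named once
lemma sortedKeys : PySem.List.sorted pvTable.keys (fun x => x) false = [1, 2, 4, 8, 16] := by decide

-- bucket selection in A on each vCPU interval
lemma selA_3 (v : Int) (h1 : 2 < v) (h2 : v < 4) : pvSelectVcpuBucket v = 4 := by
  have hc : pvTable.contains v = false := by
    simp [pvTable, pvItems, PySem.Dict.contains_mk]; omega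
  simp [pvSelectVcpuBucket, hc, sortedKeys, pvSelLoop,
    show ¬(1:Int) ≥ v by omega, show ¬(2:Int) ≥ v by omega, show (4:Int) ≥ v by omega]

lemma selA_8 (v : Int) (h1 : 4 < v) (h2 : v < 8) : pvSelectVcpuBucket v = 8 := by
  have hc : pvTable.contains v = false := by
    simp [pvTable, pvItems, PySem.Dict.contains_mk]; omega
  simp [pvSelectVcpuBucket, hc, sortedKeys, pvSelLoop,
    show ¬(1:Int) ≥ v by omega, show ¬(2:Int) ≥ v by omega,
    show ¬(4:Int) ≥ v by omega, show (8:Int) ≥ v by omega]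

lemma selA_16 (v : Int) (h1 : 8 < v) (h2 : v < 16) : pvSelectVcpuBucket v = 16 := by
  have hc : pvTable.contains v = false := by
    simp [pvTable, pvItems, PySem.Dict.contains_mk]; omega
  simp [pvSelectVcpuBucket, hc, sortedKeys, pvSelLoop,
    show ¬(1:Int) ≥ v by omega, show ¬(2:Int) ≥ v by omega,
    show ¬(4:Int) ≥ v by omega, show ¬(8:Int) ≥ v by omega, show (16:Int) ≥ v by omega]

lemma selA_last (v : Int) (h : 16 < v) : pvSelectVcpuBucket v = 16 := by
  have hc : pvTable.contains v = false := by
    simp [pvTable, pvItems, PySem.Dict.contains_mk]; omega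
  simp [pvSelectVcpuBucket, hc, sortedKeys, pvSelLoop, PySem.List.pyGet?, PySem.List.pyIdx?,
    show ¬(1:Int) ≥ v by omega, show ¬(2:Int) ≥ v by omega, show ¬(4:Int) ≥ v by omega,
    show ¬(8:Int) ≥ v by omega, show ¬(16:Int) ≥ v by omega]

-- bucket selection in B on the gap intervals (exact keys evaluate by decide in the main proof)
lemma selB_3 (v : Int) (h1 : 2 < v) (h2 : v < 4) :
    pvFindBucket v pvItems = [(8192, "e2-standard-4"), (16384, "n2-standard-4"), (32768, "n2-highmem-4")] := by
  simp [pvFindBucket, pvItems, show ¬(1:Int) ≥ v by omega, show ¬(2:Int) ≥ v by omega,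
    show (4:Int) ≥ v by omega]

lemma selB_8 (v : Int) (h1 : 4 < v) (h2 : v < 8) :
    pvFindBucket v pvItems = [(16384, "e2-standard-8"), (32768, "n2-standard-8"), (65536, "n2-highmem-8")] := by
  simp [pvFindBucket, pvItems, show ¬(1:Int) ≥ v by omega, show ¬(2:Int) ≥ v by omega,
    show ¬(4:Int) ≥ v by omega, show (8:Int) ≥ v by omega]

lemma selB_16 (v : Int) (h : 8 < v) :
    pvFindBucket v pvItems = [(32768, "n2-standard-16"), (65536, "n2-standard-16"), (131072, "n2-highmem-16")] := by
  simp [pvFindBucket, pvItems, show ¬(1:Int) ≥ v by omega, show ¬(2:Int) ≥ v by omega,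
    show ¬(4:Int) ≥ v by omega, show ¬(8:Int) ≥ v by omega]

-- ===== VERDICT (by name: the statement is the Claim_ definition above) =====
theorem get_instance_type_spec : Claim_equal_get_instance_type := by
  intro v r _ hp
  obtain ⟨hv, hr⟩ := hp
  unfold Spec_get_instance_type get_instance_type get_instance_type_alt
  simp only [if_neg (show ¬ v ≤ 0 by omega), if_neg (show ¬ r ≤ 0 by omega)]
  have hcase : v = 1 ∨ v = 2 ∨ v = 3 ∨ v = 4 ∨ (4 < v ∧ v < 8) ∨ v = 8 ∨ (8 < v ∧ v < 16) ∨ v = 16 ∨ 16 < v := by omega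
  rcases hcase with h | h | h | h | ⟨h1, h2⟩ | h | ⟨h1, h2⟩ | h | h
  · subst h
    rw [show pvSelectVcpuBucket 1 = 1 from by decide,
        show (pvTable.get? 1).getD [] = [(1024, "e2-micro"), (2048, "e2-small")] from by decide,
        show pvFindBucket 1 pvItems = [(1024, "e2-micro"), (2048, "e2-small")] from by decide,
        ramA2 r _ _ _ _ (by norm_num), findRam2]
  · subst h
    rw [show pvSelectVcpuBucket 2 = 2 from by decide,
        show (pvTable.get? 2).getD [] = [(4096, "e2-medium"), (8192, "e2-standard-2"), (16384, "n2-standard-2")] from by decide,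
        show pvFindBucket 2 pvItems = [(4096, "e2-medium"), (8192, "e2-standard-2"), (16384, "n2-standard-2")] from by decide,
        ramA3 r _ _ _ _ _ _ (by norm_num) (by norm_num), findRam3]
  · subst h
    rw [selA_3 3 (by norm_num) (by norm_num),
        show (pvTable.get? 4).getD [] = [(8192, "e2-standard-4"), (16384, "n2-standard-4"), (32768, "n2-highmem-4")] from by decide,
        selB_3 3 (by norm_num) (by norm_num),
        ramA3 r _ _ _ _ _ _ (by norm_num) (by norm_num), findRam3]
  · subst h
    rw [show pvSelectVcpuBucket 4 = 4 from by decide,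
        show (pvTable.get? 4).getD [] = [(8192, "e2-standard-4"), (16384, "n2-standard-4"), (32768, "n2-highmem-4")] from by decide,
        show pvFindBucket 4 pvItems = [(8192, "e2-standard-4"), (16384, "n2-standard-4"), (32768, "n2-highmem-4")] from by decide,
        ramA3 r _ _ _ _ _ _ (by norm_num) (by norm_num), findRam3]
  · rw [selA_8 v h1 h2,
        show (pvTable.get? 8).getD [] = [(16384, "e2-standard-8"), (32768, "n2-standard-8"), (65536, "n2-highmem-8")] from by decide,
        selB_8 v h1 h2,
        ramA3 r _ _ _ _ _ _ (by norm_num) (by norm_num), findRam3]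
  · subst h
    rw [show pvSelectVcpuBucket 8 = 8 from by decide,
        show (pvTable.get? 8).getD [] = [(16384, "e2-standard-8"), (32768, "n2-standard-8"), (65536, "n2-highmem-8")] from by decide,
        show pvFindBucket 8 pvItems = [(16384, "e2-standard-8"), (32768, "n2-standard-8"), (65536, "n2-highmem-8")] from by decide,
        ramA3 r _ _ _ _ _ _ (by norm_num) (by norm_num), findRam3]
  · rw [selA_16 v h1 h2,
        show (pvTable.get? 16).getD [] = [(32768, "n2-standard-16"), (65536, "n2-standard-16"), (131072, "n2-highmem-16")] from by decide,
        selB_16 v h1,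
        ramA3 r _ _ _ _ _ _ (by norm_num) (by norm_num), findRam3]
  · subst h
    rw [show pvSelectVcpuBucket 16 = 16 from by decide,
        show (pvTable.get? 16).getD [] = [(32768, "n2-standard-16"), (65536, "n2-standard-16"), (131072, "n2-highmem-16")] from by decide,
        show pvFindBucket 16 pvItems = [(32768, "n2-standard-16"), (65536, "n2-standard-16"), (131072, "n2-highmem-16")] from by decide,
        ramA3 r _ _ _ _ _ _ (by norm_num) (by norm_num), findRam3]
  · rw [selA_last v h,
        show (pvTable.get? 16).getD [] = [(32768, "n2-standard-16"), (65536, "n2-standard-16"), (131072, "n2-highmem-16")] from by decide,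
        selB_16 v (by omega),
        ramA3 r _ _ _ _ _ _ (by norm_num) (by norm_num), findRam3]
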